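-- pv_equiv track=rewrite | github.com/jomafica/URL_TOOLS | .venv/imcp_new.py | response_header
-- ===== SOURCE A (Python) =====
-- def response_header(id):
--     switcher = {
--         range(200, 299): 'OK',
--         range(300, 399): 'Redirect',
--         range(400, 499): 'Client error',
--         range(500, 599): 'Server error',
--     }
--     for key in switcher:
--         if type(key) is range and id in key:
--             return switcher[key]
-- ===== SOURCE B (Python) =====
-- def response_header(id):
--     pairs = (
--         (range(200, 299), 'OK'),
--         (range(300, 399), 'Redirect'),
--         (range(400, 499), 'Client error'),
--         (range(500, 599), 'Server error'),
--     )
--     table = {code: label for rng, label in pairs for code in rng}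
--     return table.get(id)
-- ===== Notes on version B (the rewrite author's own statement) =====
-- stated objective: alternative
-- what changed: B builds an explicit code->label lookup table from the (range,label) pairs once and answers with a single dict .get, instead of A's linear scan over range keys with an 'in' test per range.
import Mathlib
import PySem

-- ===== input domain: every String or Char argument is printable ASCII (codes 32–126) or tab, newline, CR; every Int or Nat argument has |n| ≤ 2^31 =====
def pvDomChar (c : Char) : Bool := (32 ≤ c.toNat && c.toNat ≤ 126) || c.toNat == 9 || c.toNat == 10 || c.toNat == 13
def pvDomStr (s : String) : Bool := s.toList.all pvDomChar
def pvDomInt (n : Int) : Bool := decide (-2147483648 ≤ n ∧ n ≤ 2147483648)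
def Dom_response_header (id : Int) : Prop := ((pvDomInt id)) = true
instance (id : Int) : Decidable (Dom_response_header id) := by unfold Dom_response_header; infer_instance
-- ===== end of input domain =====

-- B replaces A's scan over range-keys by a code->label table built once and one dict lookup (alternative decomposition).

-- ===== PORT A =====
-- A's loop over the dict's range keys: first range containing id wins, its label is returned; falls off the end with None.
def pvScanA (pairs : List (List Int × String)) (id : Int) : Option String :=
  match pairs with
  | [] => none
  | (k, v) :: rest => if id ∈ k then some v else pvScanA rest id

def response_header (id : Int) : Option String :=
  let switcher : List (List Int × String) :=
    [(PySem.List.pyRange 200 299 1, "OK"),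
     (PySem.List.pyRange 300 399 1, "Redirect"),
     (PySem.List.pyRange 400 499 1, "Client error"),
     (PySem.List.pyRange 500 599 1, "Server error")]
  pvScanA switcher id

-- ===== PORT B =====
def response_header_alt (id : Int) : Option String :=
  let pairs : List (List Int × String) :=
    [(PySem.List.pyRange 200 299 1, "OK"),
     (PySem.List.pyRange 300 399 1, "Redirect"),
     (PySem.List.pyRange 400 499 1, "Client error"),
     (PySem.List.pyRange 500 599 1, "Server error")]
  let table : PySem.Dict Int String :=
    pairs.foldl (fun d p => p.1.foldl (fun d c => d.insert c p.2) d) PySem.Dict.empty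
  table.get? id

-- ===== PRECONDITION & SPEC =====
def Spec_response_header (id : Int) (out : Option String) : Prop := out = response_header_alt id
instance (id : Int) (out : Option String) : Decidable (Spec_response_header id out) := by unfold Spec_response_header; infer_instance

-- ===== CLAIM (what is proved, stated in full; the proofs are below) =====
def Claim_equal_response_header : Prop := ∀ (id : Int), Dom_response_header id → Spec_response_header id (response_header id)

-- ===== LEMMAS AND PROOFS =====
theorem pv_get?_foldl_insert_const (l : List Int) (d : PySem.Dict Int String) (lbl : String) (x : Int) :
    (l.foldl (fun d c => d.insert c lbl) d).get? x = if x ∈ l then some lbl else d.get? x := by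
  induction l generalizing d with
  | nil => simp
  | cons c cs ih =>
      simp only [List.foldl_cons, ih, List.mem_cons, PySem.Dict.get?_insert]
      by_cases hx : x ∈ cs <;> by_cases hc : x = c <;> simp [hx, hc]

theorem pvScanA_cons (id : Int) (k : List Int) (v : String) (rest : List (List Int × String)) :
    pvScanA ((k, v) :: rest) id = if id ∈ k then some v else pvScanA rest id := rfl

theorem pvScanA_nil (id : Int) : pvScanA [] id = none := rfl

theorem pv_A_char (id : Int) : response_header id =
    (if 200 ≤ id ∧ id < 299 then some "OK" else if 300 ≤ id ∧ id < 399 then some "Redirect"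
     else if 400 ≤ id ∧ id < 499 then some "Client error"
     else if 500 ≤ id ∧ id < 599 then some "Server error" else none) := by
  show pvScanA _ id = _
  rw [pvScanA_cons, pvScanA_cons, pvScanA_cons, pvScanA_cons, pvScanA_nil]
  simp only [PySem.List.mem_pyRange_one]

theorem pv_B_char (id : Int) : response_header_alt id =
    (if 500 ≤ id ∧ id < 599 then some "Server error" else if 400 ≤ id ∧ id < 499 then some "Client error"
     else if 300 ≤ id ∧ id < 399 then some "Redirect"
     else if 200 ≤ id ∧ id < 299 then some "OK" else none) := by
  show PySem.Dict.get? _ id = _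
  rw [List.foldl_cons, List.foldl_cons, List.foldl_cons, List.foldl_cons, List.foldl_nil]
  rw [pv_get?_foldl_insert_const, pv_get?_foldl_insert_const,
      pv_get?_foldl_insert_const, pv_get?_foldl_insert_const]
  simp only [PySem.List.mem_pyRange_one, PySem.Dict.get?_empty]

-- ===== VERDICT (by name: the statement is the Claim_ definition above) =====
theorem response_header_spec : Claim_equal_response_header := by
  intro id _
  show response_header id = response_header_alt id
  rw [pv_A_char, pv_B_char]
  split_ifs <;> first | rfl | (exfalso; omega)
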